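-- pv_equiv track=rewrite | github.com/AcideFluorhydrique/CSCI-SHU-210-Data-Structures-25S | Assignments/Homework Assignment 6 (Tree)/test.py | extract_outermost_parentheses
-- ===== SOURCE A (Python) =====
-- def extract_outermost_parentheses(text):
--     stack = []
--     start = -1
--     for i, char in enumerate(text):
--         if char == '(':
--             if not stack:
--                 start = i
--             stack.append(i)
--         elif char == ')':
--             if stack:
--                 stack.pop()
--                 if not stack and start != -1:
--                     return text[start:i+1]
--     return None
-- ===== SOURCE B (Python) =====
-- def extract_outermost_parentheses(text):
--     start = text.find('(')
--     if start == -1: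
--         return None
--     end = _match(text, start + 1)
--     if end is None:
--         return None
--     return text[start:end + 1]
--
--
-- def _match(text, j):
--     """Recursive-descent matcher: index of the ')' closing the '(' just before
--     position j, scanning from j; nested groups are skipped by recursion."""
--     n = len(text)
--     while j < n:
--         c = text[j]
--         if c == ')':
--             return j
--         if c == '(':
--             k = _match(text, j + 1)   # skip the nested group recursively
--             if k is None:
--                 return None
--             j = k + 1
--         else:
--             j += 1
--     return None
-- ===== Notes on version B (the rewrite author's own statement) =====
-- stated objective: alternative
-- what changed: B first locates the first '(' with str.find and then finds its matching ')' by recursive descent: a matcher that returns the close of one group and skips each nested group by a recursive call, replacing A's single flat scan that maintains a stack of indices and a start sentinel.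
import Mathlib
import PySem

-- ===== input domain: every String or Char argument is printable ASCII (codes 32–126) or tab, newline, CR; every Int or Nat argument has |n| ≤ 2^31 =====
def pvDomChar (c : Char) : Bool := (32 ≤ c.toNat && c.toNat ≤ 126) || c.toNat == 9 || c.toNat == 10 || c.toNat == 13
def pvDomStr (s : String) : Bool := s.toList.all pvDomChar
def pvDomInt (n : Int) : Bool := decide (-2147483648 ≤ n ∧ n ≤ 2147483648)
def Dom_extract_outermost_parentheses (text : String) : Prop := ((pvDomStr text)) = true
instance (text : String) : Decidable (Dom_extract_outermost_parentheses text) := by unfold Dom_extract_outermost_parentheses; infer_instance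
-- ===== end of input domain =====

-- B finds the first '(' with str.find and then matches its close by RECURSIVE DESCENT
-- (a matcher that skips each nested group by a recursive call), replacing A's flat
-- scan with an index stack and a start sentinel (objective: alternative).

-- ===== PORT A =====
-- A's loop: stack of indices (append/pop at the end), a start sentinel initialised to -1.
def pvALoop (text : String) : List (Int × Char) → List Int → Int → Option String
  | [], _, _ => none
  | (i, c) :: rest, stack, start =>
    if c = '(' then
      pvALoop text rest (stack ++ [i]) (if stack.isEmpty then i else start)
    else if c = ')' then
      if stack.isEmpty then
        pvALoop text rest stack start
      else
        let stack' := stack.dropLast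
        if stack'.isEmpty ∧ start ≠ -1 then
          some (PySem.Str.slice text (some start) (some (i + 1)))
        else
          pvALoop text rest stack' start
    else
      pvALoop text rest stack start

def extract_outermost_parentheses (text : String) : Option String :=
  pvALoop text (PySem.List.enumerate text.toList 0) [] (-1)

-- ===== PORT B =====
-- Source B's _match(text, j): the while loop becomes recursion (the 'j = k + 1; continue'
-- and 'j += 1' steps are the tail calls); the returned index carries the bounds
-- j ≤ k < len needed only for termination.
def pvMatch (cs : List Char) (j : Nat) : Option {k : Nat // j ≤ k ∧ k < cs.length} :=
  if h : j < cs.length then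
    if cs[j] = ')' then some ⟨j, Nat.le_refl j, h⟩
    else if cs[j] = '(' then
      match pvMatch cs (j + 1) with
      | none => none
      | some ⟨k, hk1, _⟩ =>
        match pvMatch cs (k + 1) with
        | none => none
        | some ⟨k', hk1', hk2'⟩ => some ⟨k', by omega, hk2'⟩
    else
      match pvMatch cs (j + 1) with
      | none => none
      | some ⟨k, hk1, hk2⟩ => some ⟨k, by omega, hk2⟩
  else none
termination_by cs.length - j
decreasing_by all_goals omega

-- str.find returns -1 or a nonnegative index, so .toNat is exact here.
def extract_outermost_parentheses_alt (text : String) : Option String :=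
  let start := PySem.Str.find text "("
  if start = -1 then none
  else
    match pvMatch text.toList (start.toNat + 1) with
    | none => none
    | some k => some (PySem.Str.slice text (some start) (some ((k.val : Int) + 1)))

-- ===== PRECONDITION & SPEC =====
def Spec_extract_outermost_parentheses (text : String) (out : Option String) : Prop := out = extract_outermost_parentheses_alt text
instance (text : String) (out : Option String) : Decidable (Spec_extract_outermost_parentheses text out) := by unfold Spec_extract_outermost_parentheses; infer_instance

-- ===== CLAIM (what is proved, stated in full; the proofs are below) =====
def Claim_equal_extract_outermost_parentheses : Prop := ∀ (text : String), Dom_extract_outermost_parentheses text → Spec_extract_outermost_parentheses text (extract_outermost_parentheses text)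

-- ===== LEMMAS AND PROOFS =====

-- pvMatch with the bounds erased.
def pvMatch? (cs : List Char) (j : Nat) : Option Nat := (pvMatch cs j).map Subtype.val

-- d pending closes: find a close, then d-1 more after it; matchN cs 1 j = pvMatch? cs j.
def matchN (cs : List Char) : Nat → Nat → Option Nat
  | 0, j => some (j - 1)
  | d + 1, j => (pvMatch? cs j).bind (fun k => matchN cs d (k + 1))

theorem pvMatch?_none {cs : List Char} {j : Nat} (h : ¬ j < cs.length) :
    pvMatch? cs j = none := by
  unfold pvMatch? pvMatch
  rw [dif_neg h]
  rfl

theorem pvMatch?_close {cs : List Char} {j : Nat} (h : j < cs.length)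
    (hc : cs[j] = ')') : pvMatch? cs j = some j := by
  unfold pvMatch?
  rw [pvMatch, dif_pos h, if_pos hc]
  rfl

theorem pvMatch?_open {cs : List Char} {j : Nat} (h : j < cs.length)
    (hc : cs[j] = '(') :
    pvMatch? cs j = (pvMatch? cs (j + 1)).bind (fun k => pvMatch? cs (k + 1)) := by
  unfold pvMatch?
  rw [pvMatch, dif_pos h, if_neg (by rw [hc]; decide), if_pos hc]
  cases h1 : pvMatch cs (j + 1) with
  | none => rfl
  | some k =>
    obtain ⟨k, hk1, hk2⟩ := k
    cases h2 : pvMatch cs (k + 1) with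
    | none => simp [h2]
    | some k' => obtain ⟨k', hk1', hk2'⟩ := k'; simp [h2]

theorem pvMatch?_skip {cs : List Char} {j : Nat} (h : j < cs.length)
    (h1 : cs[j] ≠ ')') (h2 : cs[j] ≠ '(') :
    pvMatch? cs j = pvMatch? cs (j + 1) := by
  unfold pvMatch?
  rw [pvMatch, dif_pos h, if_neg h1, if_neg h2]
  cases pvMatch cs (j + 1) with
  | none => rfl
  | some k => obtain ⟨k, hk1, hk2⟩ := k; rfl

theorem matchN_one (cs : List Char) (j : Nat) : matchN cs 1 j = pvMatch? cs j := by
  cases h : pvMatch? cs j <;> simp [matchN, h]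

theorem matchN_close {cs : List Char} {j : Nat} (h : j < cs.length)
    (hc : cs[j] = ')') (d : Nat) : matchN cs (d + 1) j = matchN cs d (j + 1) := by
  simp [matchN, pvMatch?_close h hc]

theorem matchN_open {cs : List Char} {j : Nat} (h : j < cs.length)
    (hc : cs[j] = '(') (e : Nat) : matchN cs (e + 1) j = matchN cs (e + 1 + 1) (j + 1) := by
  simp only [matchN, pvMatch?_open h hc, Option.bind_assoc]

theorem matchN_skip {cs : List Char} {j : Nat} (h : j < cs.length)
    (h1 : cs[j] ≠ ')') (h2 : cs[j] ≠ '(') (d : Nat) :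
    matchN cs (d + 1) j = matchN cs (d + 1) (j + 1) := by
  simp only [matchN, pvMatch?_skip h h1 h2]

-- Before the first '(', A's loop leaves its state ([], -1) untouched.
theorem pvALoop_prefix (text : String) (pre : List Char) (s : Int)
    (rest : List (Int × Char)) (h : '(' ∉ pre) :
    pvALoop text (PySem.List.enumerate pre s ++ rest) [] (-1) =
      pvALoop text rest [] (-1) := by
  induction pre generalizing s with
  | nil => simp [PySem.List.enumerate_nil]
  | cons c cs ih =>
    simp only [PySem.List.enumerate_cons, List.cons_append]
    have hc : c ≠ '(' := fun hc => h (hc ▸ List.mem_cons_self)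
    by_cases hcr : c = ')'
    · simp [pvALoop, hcr, ih (s + 1) (fun hm => h (List.mem_cons_of_mem _ hm))]
    · simp [pvALoop, hc, hcr, ih (s + 1) (fun hm => h (List.mem_cons_of_mem _ hm))]

-- The core correspondence: from position j, with a nonempty stack of d indices and a
-- nonnegative start, A's loop returns the slice ending just after the d-th unmatched
-- close, i.e. after matchN cs d j.
theorem pvALoop_match (text : String) :
    ∀ (f j : Nat) (stk : List Int) (s : Int),
      text.toList.length - j ≤ f → stk ≠ [] → 0 ≤ s →
      pvALoop text (PySem.List.enumerate (text.toList.drop j) (j : Int)) stk s =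
        (matchN text.toList stk.length j).map
          (fun k => PySem.Str.slice text (some s) (some ((k : Int) + 1))) := by
  intro f
  induction f with
  | zero =>
    intro j stk s hf hne hs
    obtain ⟨a, t, rfl⟩ : ∃ a t, stk = a :: t := by
      cases stk with
      | nil => exact absurd rfl hne
      | cons a t => exact ⟨a, t, rfl⟩
    rw [List.drop_eq_nil_of_le (by omega)]
    simp [PySem.List.enumerate_nil, pvALoop, matchN,
      pvMatch?_none (show ¬ j < text.toList.length by omega)]
  | succ f ih =>
    intro j stk s hf hne hs
    by_cases hj : j < text.toList.length
    · obtain ⟨e, he⟩ : ∃ e, stk.length = e + 1 := by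
        cases stk with
        | nil => exact absurd rfl hne
        | cons a t => exact ⟨t.length, rfl⟩
      rw [List.drop_eq_getElem_cons hj, PySem.List.enumerate_cons]
      have hj1 : ((j : Int) + 1) = ((j + 1 : Nat) : Int) := by push_cast; ring
      by_cases hcc : text.toList[j] = ')'
      · rw [hcc]
        by_cases h1 : stk.length = 1
        · have hdl : stk.dropLast = [] := by
            rw [← List.length_eq_zero_iff, List.length_dropLast, h1]
          have hs' : s ≠ -1 := by omega
          have ha : pvALoop text (((j : Int), ')') ::
              PySem.List.enumerate (text.toList.drop (j + 1)) ((j : Int) + 1)) stk s =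
              some (PySem.Str.slice text (some s) (some ((j : Int) + 1))) := by
            simp [pvALoop, List.isEmpty_iff, hne, hdl, hs']
          rw [ha, h1, matchN_one, pvMatch?_close hj hcc]
          rfl
        · have hdlne : stk.dropLast ≠ [] := by
            rw [← List.length_pos_iff, List.length_dropLast]; omega
          have ha : pvALoop text (((j : Int), ')') ::
              PySem.List.enumerate (text.toList.drop (j + 1)) ((j : Int) + 1)) stk s =
              pvALoop text (PySem.List.enumerate (text.toList.drop (j + 1)) ((j : Int) + 1))
                stk.dropLast s := by
            simp [pvALoop, List.isEmpty_iff, hne, hdlne]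
          rw [ha, hj1, ih (j + 1) stk.dropLast s (by omega) hdlne hs,
            List.length_dropLast, he, Nat.add_sub_cancel, matchN_close hj hcc e]
      · by_cases hco : text.toList[j] = '('
        · have ha : pvALoop text (((j : Int), text.toList[j]) ::
              PySem.List.enumerate (text.toList.drop (j + 1)) ((j : Int) + 1)) stk s =
              pvALoop text (PySem.List.enumerate (text.toList.drop (j + 1)) ((j : Int) + 1))
                (stk ++ [(j : Int)]) s := by
            simp [pvALoop, hco, List.isEmpty_iff, hne]
          rw [ha, hj1, ih (j + 1) (stk ++ [(j : Int)]) s (by omega) (by simp) hs]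
          simp only [List.length_append, List.length_singleton, he]
          rw [matchN_open hj hco e]
        · have ha : pvALoop text (((j : Int), text.toList[j]) ::
              PySem.List.enumerate (text.toList.drop (j + 1)) ((j : Int) + 1)) stk s =
              pvALoop text (PySem.List.enumerate (text.toList.drop (j + 1)) ((j : Int) + 1))
                stk s := by
            simp [pvALoop, hco, hcc]
          rw [ha, hj1, ih (j + 1) stk s (by omega) hne hs, he, matchN_skip hj hcc hco e]
    · obtain ⟨a, t, rfl⟩ : ∃ a t, stk = a :: t := by
        cases stk with
        | nil => exact absurd rfl hne
        | cons a t => exact ⟨a, t, rfl⟩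
      rw [List.drop_eq_nil_of_le (by omega)]
      simp [PySem.List.enumerate_nil, pvALoop, matchN, pvMatch?_none hj]

-- [a] is an infix of l iff a ∈ l.
theorem pv_singleton_infix {a : Char} {l : List Char} : [a] <:+: l ↔ a ∈ l := by
  constructor
  · intro h
    exact (List.singleton_sublist).mp h.sublist
  · intro h
    obtain ⟨s, t, rfl⟩ := List.append_of_mem h
    exact ⟨s, t, by simp⟩

-- ===== VERDICT (by name: the statement is the Claim_ definition above) =====
theorem extract_outermost_parentheses_spec : Claim_equal_extract_outermost_parentheses := by
  intro text _
  unfold Spec_extract_outermost_parentheses extract_outermost_parentheses extract_outermost_parentheses_alt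
  simp only []
  set cs := text.toList with hcs
  by_cases h : PySem.Str.find text "(" = -1
  · rw [if_pos h]
    have hnotin : '(' ∉ cs := by
      rw [← pv_singleton_infix]
      have := h
      simp only [PySem.Str.find_eq] at this
      rw [PySem.Chars.find_eq_neg_one_iff] at this
      simpa using this
    have := pvALoop_prefix text cs 0 [] hnotin
    simpa using this
  · rw [if_neg h]
    have hfind : PySem.Str.find text "(" = PySem.Chars.find cs "(".toList := by
      simp [hcs]
    set f := PySem.Str.find text "(" with hf
    have hspec := PySem.Chars.findFrom_natCast_spec cs "(".toList 0 (by simp)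
      (by simpa [Nat.cast_zero, PySem.Chars.findFrom_zero, ← hfind] using h)
    simp only [Nat.cast_zero, PySem.Chars.findFrom_zero, ← hfind] at hspec
    obtain ⟨hge, hpre, hmin⟩ := hspec
    have hge0 : 0 ≤ f := by exact_mod_cast hge
    set n := f.toNat with hn
    have hfn : f = (n : Int) := (Int.toNat_of_nonneg hge0).symm
    have hdrop : cs.drop n = '(' :: cs.drop (n + 1) := by
      obtain ⟨t, ht⟩ := hpre
      simp at ht
      have h2 : cs.drop (n + 1) = t := by
        have h3 := congrArg (List.drop 1) ht
        simpa [List.drop_drop, Nat.add_comm] using h3.symm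
      rw [h2, ← ht]
    have hnlt : n < cs.length := by
      by_contra hcon
      have h4 := hdrop
      rw [List.drop_eq_nil_of_le (by omega)] at h4
      simp at h4
    have hnotin : '(' ∉ cs.take n := by
      intro hm
      obtain ⟨j, hj, hjv⟩ := List.getElem_of_mem hm
      rw [List.getElem_take] at hjv
      have hjn : j < n := by simp at hj; omega
      refine hmin j (by omega) (by omega) ?_
      have : cs.drop j = '(' :: cs.drop (j + 1) := by
        rw [List.drop_eq_getElem_cons (by omega), hjv]
      exact ⟨cs.drop (j + 1), by simpa using this.symm⟩
    -- A side: skip the prefix, consume the first '('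
    have hsplit : cs = cs.take n ++ cs.drop n := (List.take_append_drop n cs).symm
    have henum : PySem.List.enumerate cs 0
        = PySem.List.enumerate (cs.take n) 0 ++ PySem.List.enumerate (cs.drop n) (n : Int) := by
      conv_lhs => rw [hsplit]
      rw [PySem.List.enumerate_append]
      congr 2
      simp [List.length_take, Nat.min_eq_left (le_of_lt hnlt)]
    have hA : pvALoop text (PySem.List.enumerate cs 0) [] (-1)
        = pvALoop text (PySem.List.enumerate (cs.drop (n + 1)) ((n : Int) + 1)) [(n : Int)] (n : Int) := by
      rw [henum, pvALoop_prefix text (cs.take n) 0 _ hnotin, hdrop,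
          PySem.List.enumerate_cons]
      simp [pvALoop]
    have hj1 : ((n : Int) + 1) = ((n + 1 : Nat) : Int) := by push_cast; ring
    rw [hA, hj1, pvALoop_match text cs.length (n + 1) [(n : Int)] (n : Int)
      (by rw [← hcs]; omega) (by simp) (by positivity)]
    rw [List.length_singleton, matchN_one, hfn]
    simp only [Int.toNat_natCast]
    unfold pvMatch?
    cases hm : pvMatch cs (n + 1) with
    | none => rfl
    | some k => rfl
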